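-- pv_equiv track=rewrite | github.com/oreolic/SGE_EGFR | PE_Library_Searcher_FINAL.py | _find_rp
-- ===== SOURCE A (Python) =====
-- def _find_rp(read,ed1_rp,rp_length):
--     ## ed1_bc = dictinary {}
--     n= 0
--     rp = 'FALSE'
--     rp_index = -1
--     while n < len(read)-rp_length+1:
--         motif = read[n:n+rp_length]
--         if motif in ed1_rp:
--             rp = ed1_rp[motif]
--             rp_index = n
--             break
--         else: pass
--         n += 1
--
--     return rp,rp_index
-- ===== SOURCE B (Python) =====
-- def _find_rp(read, ed1_rp, rp_length):
--     # One str.find per key (length-matching keys only), keeping the leftmost hit,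
--     # instead of testing every window of read for dict membership.
--     best = None
--     for k, v in ed1_rp.items():
--         if len(k) == rp_length:
--             i = read.find(k)
--             if i != -1:
--                 if best is None or i < best[1]:
--                     best = (v, i)
--     if best is None:
--         return 'FALSE', -1
--     return best
-- ===== Notes on version B (the rewrite author's own statement) =====
-- stated objective: faster
-- what changed: Replaces A's sliding-window scan (one slice + dict-membership test per offset of read) by one str.find per length-matching dict key, keeping the hit with the smallest index; the per-offset slicing/membership loop disappears.
-- outside the precondition, e.g. on _find_rp('abc', {'ab': 'X'}, -1): A returns ('X', 0), B returns ('FALSE', -1)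
import Mathlib
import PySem

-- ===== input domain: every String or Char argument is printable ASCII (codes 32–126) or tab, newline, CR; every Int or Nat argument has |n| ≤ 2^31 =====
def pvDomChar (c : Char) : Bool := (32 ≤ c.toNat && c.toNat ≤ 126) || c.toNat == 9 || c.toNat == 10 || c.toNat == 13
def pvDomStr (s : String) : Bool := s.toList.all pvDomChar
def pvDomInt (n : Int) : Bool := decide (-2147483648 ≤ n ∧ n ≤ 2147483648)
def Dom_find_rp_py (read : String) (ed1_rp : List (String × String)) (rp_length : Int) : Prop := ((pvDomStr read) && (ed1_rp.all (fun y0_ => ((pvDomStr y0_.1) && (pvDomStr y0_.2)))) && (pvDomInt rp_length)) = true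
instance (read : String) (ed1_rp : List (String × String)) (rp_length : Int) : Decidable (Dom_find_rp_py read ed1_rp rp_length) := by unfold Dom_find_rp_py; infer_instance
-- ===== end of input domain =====

-- B replaces A's per-window dict-membership scan by one str.find per (length-matching)
-- dict key, keeping the leftmost hit (measurably faster: no per-offset slicing loop).

-- ===== PORT A =====
-- the 'while n < len(read)-rp_length+1' loop; fuel = number of remaining iterations
def pvFindRpLoop (read : String) (d : PySem.Dict String String) (rp_length : Int) : Nat → Int → String × Int
  | 0, _ => ("FALSE", -1)
  | fuel + 1, n =>
    let motif := PySem.Str.slice read (some n) (some (n + rp_length))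
    match d.get? motif with
    | some v => (v, n)
    | none => pvFindRpLoop read d rp_length fuel (n + 1)

def find_rp_py (read : String) (ed1_rp : List (String × String)) (rp_length : Int) : String × Int :=
  let d := PySem.Dict.ofList ed1_rp
  pvFindRpLoop read d rp_length (PySem.Str.len read - rp_length + 1).toNat 0

-- ===== PORT B =====
-- loop body of Source B: best = None | (value, leftmost index found so far)
def pvFindRpBest (read : String) (rp_length : Int) (best : Option (String × Int)) (kv : String × String) : Option (String × Int) :=
  if PySem.Str.len kv.1 = rp_length then
    let i := PySem.Str.find read kv.1
    if i = -1 then best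
    else
      match best with
      | none => some (kv.2, i)
      | some b => if i < b.2 then some (kv.2, i) else best
  else best

def find_rp_py_alt (read : String) (ed1_rp : List (String × String)) (rp_length : Int) : String × Int :=
  match (PySem.Dict.ofList ed1_rp).items.foldl (pvFindRpBest read rp_length) none with
  | none => ("FALSE", -1)
  | some b => b

-- ===== PRECONDITION & SPEC =====
-- Pre_ excludes negative rp_length, where Python's negative-stop slicing makes A's windows
-- variable-length truncated strings (an accident of slicing, outside the fixed-length-motif
-- purpose of the function) while B's fixed-length key search naturally finds nothing.
def Pre_find_rp_py (read : String) (ed1_rp : List (String × String)) (rp_length : Int) : Prop :=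
  0 ≤ rp_length
instance (read : String) (ed1_rp : List (String × String)) (rp_length : Int) : Decidable (Pre_find_rp_py read ed1_rp rp_length) := by unfold Pre_find_rp_py; infer_instance

def pvWitness_find_rp_py : String × (List (String × String)) × Int := ("GATTACA", [("TT", "rp1"), ("CA", "rp2")], 2)

def Spec_find_rp_py (read : String) (ed1_rp : List (String × String)) (rp_length : Int) (out : String × Int) : Prop := out = find_rp_py_alt read ed1_rp rp_length
instance (read : String) (ed1_rp : List (String × String)) (rp_length : Int) (out : String × Int) : Decidable (Spec_find_rp_py read ed1_rp rp_length out) := by unfold Spec_find_rp_py; infer_instance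

-- ===== CLAIM (what is proved, stated in full; the proofs are below) =====
def Claim_equal_find_rp_py : Prop := ∀ (read : String) (ed1_rp : List (String × String)) (rp_length : Int), Dom_find_rp_py read ed1_rp rp_length → Pre_find_rp_py read ed1_rp rp_length → Spec_find_rp_py read ed1_rp rp_length (find_rp_py read ed1_rp rp_length)

-- ===== LEMMAS AND PROOFS =====

-- The window A looks at when its counter is the natural number n.
def pvMotif (read : String) (rp_length : Int) (n : Nat) : String :=
  PySem.Str.slice read (some (n : Int)) (some ((n : Int) + rp_length))

-- The candidate list B's fold effectively reduces: (value, first occurrence) per qualifying key.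
def pvCands (read : String) (rp_length : Int) (items : List (String × String)) : List (String × Int) :=
  items.filterMap (fun kv =>
    if PySem.Str.len kv.1 = rp_length ∧ PySem.Str.find read kv.1 ≠ -1 then
      some (kv.2, PySem.Str.find read kv.1)
    else none)

-- binary "keep the better (strictly smaller index wins, earlier wins ties)" on candidates
def pvPick (best : Option (String × Int)) (c : String × Int) : Option (String × Int) :=
  match best with
  | none => some c
  | some b => if c.2 < b.2 then some c else best

lemma pvMotif_toList (read : String) (rp_length : Int) (hL : 0 ≤ rp_length) (n : Nat) :
    (pvMotif read rp_length n).toList = (read.toList.drop n).take rp_length.toNat := by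
  unfold pvMotif
  rw [PySem.Str.toList_slice, PySem.Chars.slice_eq_listSlice,
    PySem.List.slice_toNat _ (by positivity) (by omega)]
  congr 1
  omega

lemma pvFold_eq_pick (read : String) (rp_length : Int) (items : List (String × String))
    (acc : Option (String × Int)) :
    items.foldl (pvFindRpBest read rp_length) acc = (pvCands read rp_length items).foldl pvPick acc := by
  induction items generalizing acc with
  | nil => rfl
  | cons kv rest ih =>
    rw [List.foldl_cons, ih]
    unfold pvCands
    rw [List.filterMap_cons]
    by_cases h1 : PySem.Str.len kv.1 = rp_length
    · by_cases h2 : PySem.Str.find read kv.1 = -1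
      · rw [if_neg (by intro hc; exact hc.2 h2)]
        have hb : pvFindRpBest read rp_length acc kv = acc := by
          unfold pvFindRpBest
          rw [if_pos h1]
          show (if PySem.Str.find read kv.1 = -1 then acc else _) = acc
          rw [if_pos h2]
        rw [hb]
      · rw [if_pos ⟨h1, h2⟩, List.foldl_cons]
        have hb : pvFindRpBest read rp_length acc kv = pvPick acc (kv.2, PySem.Str.find read kv.1) := by
          cases acc with
          | none =>
            unfold pvFindRpBest pvPick
            rw [if_pos h1]
            show (if PySem.Str.find read kv.1 = -1 then none else some (kv.2, PySem.Str.find read kv.1))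
              = some (kv.2, PySem.Str.find read kv.1)
            rw [if_neg h2]
          | some b =>
            unfold pvFindRpBest pvPick
            rw [if_pos h1]
            show (if PySem.Str.find read kv.1 = -1 then some b
                else if PySem.Str.find read kv.1 < b.2 then some (kv.2, PySem.Str.find read kv.1) else some b)
              = if (kv.2, PySem.Str.find read kv.1).2 < b.2 then some (kv.2, PySem.Str.find read kv.1) else some b
            rw [if_neg h2]
        rw [hb]
    · rw [if_neg (by intro hc; exact h1 hc.1)]
      have hb : pvFindRpBest read rp_length acc kv = acc := by
        unfold pvFindRpBest
        rw [if_neg h1]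
      rw [hb]

lemma pvPick_ne_none (C : List (String × Int)) (b : String × Int) :
    C.foldl pvPick (some b) ≠ none := by
  induction C generalizing b with
  | nil => simp
  | cons c rest ih =>
    rw [List.foldl_cons]
    show rest.foldl pvPick (pvPick (some b) c) ≠ none
    unfold pvPick
    by_cases hlt : c.2 < b.2
    · simp only [hlt, if_true]; exact ih c
    · simp only [hlt, if_false]; exact ih b

lemma pvPick_mem (C : List (String × Int)) (acc : Option (String × Int)) (r : String × Int)
    (h : C.foldl pvPick acc = some r) : r ∈ C ∨ acc = some r := by
  induction C generalizing acc with
  | nil => right; simpa using h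
  | cons c rest ih =>
    rw [List.foldl_cons] at h
    rcases ih _ h with hr | hr
    · left; exact List.mem_cons_of_mem _ hr
    · cases acc with
      | none =>
        left
        have : c = r := by simpa [pvPick] using hr
        simp [this]
      | some b =>
        by_cases hlt : c.2 < b.2
        · left
          have : c = r := by simpa [pvPick, hlt] using hr
          simp [this]
        · right; simpa [pvPick, hlt] using hr

lemma pvPick_min (C : List (String × Int)) (acc : Option (String × Int)) (r : String × Int)
    (h : C.foldl pvPick acc = some r) : (∀ c ∈ C, r.2 ≤ c.2) ∧ (∀ b, acc = some b → r.2 ≤ b.2) := by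
  induction C generalizing acc with
  | nil =>
    refine ⟨by simp, ?_⟩
    intro b hb
    simp only [List.foldl_nil] at h
    rw [hb] at h
    cases h
    exact le_refl _
  | cons c rest ih =>
    rw [List.foldl_cons] at h
    obtain ⟨h1, h2⟩ := ih _ h
    have hpick : ∀ b, pvPick acc c = some b → r.2 ≤ b.2 := h2
    constructor
    · intro c' hc'
      rcases List.mem_cons.mp hc' with rfl | hc'
      · cases acc with
        | none => exact hpick c' rfl
        | some b =>
          by_cases hlt : c'.2 < b.2
          · exact hpick c' (by simp [pvPick, hlt])
          · have := hpick b (by simp [pvPick, hlt])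
            omega
      · exact h1 c' hc'
    · intro b hb
      subst hb
      by_cases hlt : c.2 < b.2
      · have := hpick c (by simp [pvPick, hlt])
        omega
      · exact hpick b (by simp [pvPick, hlt])

lemma pvLoopA_hit (read : String) (d : PySem.Dict String String) (rp_length : Int)
    (hL : 0 ≤ rp_length) (N : Nat) (hN : N = read.toList.length + 1 - rp_length.toNat)
    (n₀ : Nat) (v₀ : String) (hlt : n₀ < N) (h0 : d.get? (pvMotif read rp_length n₀) = some v₀)
    (fuel n : Nat) (h : n + fuel = N) (hn : n ≤ n₀)
    (hmin : ∀ m, n ≤ m → m < n₀ → d.get? (pvMotif read rp_length m) = none) :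
    pvFindRpLoop read d rp_length fuel (n : Int) = (v₀, (n₀ : Int)) := by
  induction fuel generalizing n with
  | zero => omega
  | succ fuel ih =>
    show (match d.get? (PySem.Str.slice read (some (n:Int)) (some ((n:Int) + rp_length))) with
      | some v => (v, (n:Int))
      | none => pvFindRpLoop read d rp_length fuel ((n:Int) + 1)) = (v₀, (n₀ : Int))
    by_cases heq : n = n₀
    · subst heq
      rw [show PySem.Str.slice read (some (n:Int)) (some ((n:Int) + rp_length)) = pvMotif read rp_length n from rfl, h0]
    · have hlt' : n < n₀ := by omega
      rw [show PySem.Str.slice read (some (n:Int)) (some ((n:Int) + rp_length)) = pvMotif read rp_length n from rfl,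
        hmin n le_rfl hlt']
      have : ((n:Int) + 1) = ((n+1 : Nat) : Int) := by push_cast; ring
      rw [this]
      exact ih (n+1) (by omega) (by omega) (fun m hm hm' => hmin m (by omega) hm')

lemma pvLoopA_none (read : String) (d : PySem.Dict String String) (rp_length : Int)
    (N : Nat) (fuel n : Nat) (h : n + fuel = N)
    (hall : ∀ m, n ≤ m → m < N → d.get? (pvMotif read rp_length m) = none) :
    pvFindRpLoop read d rp_length fuel (n : Int) = ("FALSE", -1) := by
  induction fuel generalizing n with
  | zero => rfl
  | succ fuel ih =>
    show (match d.get? (PySem.Str.slice read (some (n:Int)) (some ((n:Int) + rp_length))) with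
      | some v => (v, (n:Int))
      | none => pvFindRpLoop read d rp_length fuel ((n:Int) + 1)) = ("FALSE", -1)
    rw [show PySem.Str.slice read (some (n:Int)) (some ((n:Int) + rp_length)) = pvMotif read rp_length n from rfl,
      hall n le_rfl (by omega)]
    have : ((n:Int) + 1) = ((n+1 : Nat) : Int) := by push_cast; ring
    rw [this]
    exact ih (n+1) (by omega) (fun m hm hm' => hall m (by omega) hm')

-- candidate → window hit at its index
lemma pvCand_hit (read : String) (ed1_rp : List (String × String)) (rp_length : Int)
    (hL : 0 ≤ rp_length) (c : String × Int)
    (hc : c ∈ pvCands read rp_length (PySem.Dict.ofList ed1_rp).items) :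
    ∃ j : Nat, c.2 = (j : Int) ∧ j < read.toList.length + 1 - rp_length.toNat ∧
      (PySem.Dict.ofList ed1_rp).get? (pvMotif read rp_length j) = some c.1 := by
  unfold pvCands at hc
  rw [List.mem_filterMap] at hc
  obtain ⟨kv, hkv, hsome⟩ := hc
  split_ifs at hsome with hcond
  obtain ⟨hlen, hne⟩ := hcond
  cases hsome
  set f := PySem.Str.find read kv.1 with hf
  have hf0 : 0 ≤ f := by
    have := PySem.Chars.neg_one_le_find read.toList kv.1.toList
    rw [PySem.Str.find_eq] at hf
    omega
  have hfl : f ≤ (read.toList.length : Int) := by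
    have := PySem.Chars.find_le_length read.toList kv.1.toList
    rw [PySem.Str.find_eq] at hf
    omega
  obtain ⟨hpre, -⟩ := PySem.Chars.find_spec (s := read.toList) (sub := kv.1.toList)
    (by rw [PySem.Str.find_eq] at hf; omega)
  rw [← PySem.Str.find_eq, ← hf] at hpre
  have hklen : kv.1.toList.length = rp_length.toNat := by
    have := PySem.Str.len_eq kv.1
    omega
  have hdlen : kv.1.toList.length ≤ read.toList.length - f.toNat := by
    have := hpre.length_le
    simpa using this
  refine ⟨f.toNat, by omega, by omega, ?_⟩
  have hmot : pvMotif read rp_length f.toNat = kv.1 := by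
    rw [← String.toList_inj, pvMotif_toList read rp_length hL]
    rw [← hklen]
    exact (List.prefix_iff_eq_take.mp hpre).symm
  rw [hmot]
  exact PySem.Dict.get?_of_mem_items _ hkv (PySem.Dict.nodup_keys_ofList ed1_rp)

-- window hit → candidate with index ≤ the window position
lemma pvHit_cand (read : String) (ed1_rp : List (String × String)) (rp_length : Int)
    (hL : 0 ≤ rp_length) (n : Nat) (v : String)
    (hn : n < read.toList.length + 1 - rp_length.toNat)
    (h : (PySem.Dict.ofList ed1_rp).get? (pvMotif read rp_length n) = some v) :
    (pvMotif read rp_length n, v) ∈ (PySem.Dict.ofList ed1_rp).items ∧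
      PySem.Str.len (pvMotif read rp_length n) = rp_length ∧
      0 ≤ PySem.Str.find read (pvMotif read rp_length n) ∧
      PySem.Str.find read (pvMotif read rp_length n) ≤ (n : Int) := by
  have hLn : rp_length.toNat + n ≤ read.toList.length := by omega
  have hmt := pvMotif_toList read rp_length hL n
  have hmlen : (pvMotif read rp_length n).toList.length = rp_length.toNat := by
    rw [hmt, List.length_take, List.length_drop]
    omega
  have hpre : (pvMotif read rp_length n).toList <+: read.toList.drop n := by
    rw [hmt]; exact List.take_prefix _ _
  have hinf : (pvMotif read rp_length n).toList <:+: read.toList :=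
    (PySem.Chars.isIn_iff_infix _ _).mp
      ((PySem.Chars.exists_prefix_drop_iff_isIn _ _).mp ⟨n, hpre⟩)
  have hfind0 : 0 ≤ PySem.Str.find read (pvMotif read rp_length n) := by
    rw [PySem.Str.find_eq]
    exact (PySem.Chars.find_nonneg_iff _ _).mpr hinf
  refine ⟨PySem.Dict.mem_items_of_get?_eq_some _ h, ?_, hfind0, ?_⟩
  · rw [PySem.Str.len_eq, hmlen]
    omega
  · obtain ⟨-, hminf⟩ := PySem.Chars.find_spec (s := read.toList)
      (sub := (pvMotif read rp_length n).toList) (by rwa [PySem.Str.find_eq] at hfind0)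
    rw [← PySem.Str.find_eq] at hminf
    by_contra hgt
    push_neg at hgt
    exact hminf n (by omega) hpre

-- ===== VERDICT (by name: the statement is the Claim_ definition above) =====
theorem find_rp_py_spec : Claim_equal_find_rp_py := by
  intro read ed1_rp rp_length _hDom hPre
  unfold Spec_find_rp_py
  unfold Pre_find_rp_py at hPre
  classical
  have hfuel : (PySem.Str.len read - rp_length + 1).toNat
      = read.toList.length + 1 - rp_length.toNat := by
    rw [PySem.Str.len_eq]
    omega
  have hA : find_rp_py read ed1_rp rp_length
      = pvFindRpLoop read (PySem.Dict.ofList ed1_rp) rp_length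
          (read.toList.length + 1 - rp_length.toNat) ((0 : Nat) : Int) := by
    unfold find_rp_py
    rw [hfuel]
    rfl
  have hB : find_rp_py_alt read ed1_rp rp_length
      = (match (pvCands read rp_length (PySem.Dict.ofList ed1_rp).items).foldl pvPick none with
        | none => ("FALSE", -1)
        | some b => b) := by
    unfold find_rp_py_alt
    rw [pvFold_eq_pick]
  by_cases hex : ∃ n : Nat, n < read.toList.length + 1 - rp_length.toNat ∧
      ((PySem.Dict.ofList ed1_rp).get? (pvMotif read rp_length n)).isSome
  · obtain ⟨n₁, hn₁⟩ := hex
    have hex' : ∃ n : Nat, n < read.toList.length + 1 - rp_length.toNat ∧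
        ((PySem.Dict.ofList ed1_rp).get? (pvMotif read rp_length n)).isSome := ⟨n₁, hn₁⟩
    set n₀ := Nat.find hex' with hn₀def
    obtain ⟨hn₀N, hn₀some⟩ := Nat.find_spec hex'
    obtain ⟨v₀, hv₀⟩ := Option.isSome_iff_exists.mp hn₀some
    have hmin : ∀ m, m < n₀ → (PySem.Dict.ofList ed1_rp).get? (pvMotif read rp_length m) = none := by
      intro m hm
      have := Nat.find_min hex' hm
      by_cases hmN : m < read.toList.length + 1 - rp_length.toNat
      · rcases Option.eq_none_or_eq_some ((PySem.Dict.ofList ed1_rp).get? (pvMotif read rp_length m)) with hnone | ⟨v, hv⟩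
        · exact hnone
        · exact absurd ⟨hmN, by simp [hv]⟩ this
      · omega
    have hAval : find_rp_py read ed1_rp rp_length = (v₀, (n₀ : Int)) := by
      rw [hA]
      exact pvLoopA_hit read _ rp_length hPre _ rfl n₀ v₀ hn₀N hv₀ _ 0 (by omega) (by omega)
        (fun m _ hm' => hmin m hm')
    -- the pair (v₀, n₀) is a candidate
    have hhc := pvHit_cand read ed1_rp rp_length hPre n₀ v₀ hn₀N hv₀
    obtain ⟨hmem, hlenm, hf0, hfle⟩ := hhc
    have hcand : (v₀, PySem.Str.find read (pvMotif read rp_length n₀))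
        ∈ pvCands read rp_length (PySem.Dict.ofList ed1_rp).items := by
      unfold pvCands
      rw [List.mem_filterMap]
      have hne : PySem.Str.find read (pvMotif read rp_length n₀) ≠ -1 := by
        intro h
        rw [h] at hf0
        exact absurd hf0 (by decide)
      exact ⟨(pvMotif read rp_length n₀, v₀), hmem, by rw [if_pos ⟨hlenm, hne⟩]⟩
    have hfeq : PySem.Str.find read (pvMotif read rp_length n₀) = (n₀ : Int) := by
      obtain ⟨j, hj2, hjN, hjget⟩ := pvCand_hit read ed1_rp rp_length hPre _ hcand
      have hj2' : PySem.Str.find read (pvMotif read rp_length n₀) = ((j : Nat) : Int) := hj2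
      have : n₀ ≤ j := by
        by_contra hjl
        push_neg at hjl
        exact absurd (hmin j hjl) (by simp [hjget])
      omega
    rw [hfeq] at hcand
    -- B's fold returns exactly this candidate
    cases hres : (pvCands read rp_length (PySem.Dict.ofList ed1_rp).items).foldl pvPick none with
    | none =>
      exfalso
      cases hCs : pvCands read rp_length (PySem.Dict.ofList ed1_rp).items with
      | nil => rw [hCs] at hcand; simp at hcand
      | cons c rest =>
        rw [hCs, List.foldl_cons] at hres
        exact pvPick_ne_none rest c (by simpa [pvPick] using hres)
    | some r =>
      have hrmem : r ∈ pvCands read rp_length (PySem.Dict.ofList ed1_rp).items := by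
        rcases pvPick_mem _ _ _ hres with hr | hr
        · exact hr
        · cases hr
      have hrle : r.2 ≤ (n₀ : Int) := by
        have := (pvPick_min _ _ _ hres).1 _ hcand
        simpa using this
      obtain ⟨j, hj2, hjN, hjget⟩ := pvCand_hit read ed1_rp rp_length hPre _ hrmem
      have hn₀j : n₀ ≤ j := by
        by_contra hjl
        push_neg at hjl
        exact absurd (hmin j hjl) (by simp [hjget])
      have hjeq : j = n₀ := by omega
      subst hjeq
      have hr1 : r.1 = v₀ := by
        rw [hv₀] at hjget
        exact (Option.some_inj.mp hjget).symm
      rw [hAval, hB, hres]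
      have hr2 : r.2 = ((n₀ : Nat) : Int) := hj2
      have : r = (v₀, (n₀ : Int)) := Prod.ext hr1 hr2
      rw [this]
  · push_neg at hex
    have hall : ∀ m, m < read.toList.length + 1 - rp_length.toNat →
        (PySem.Dict.ofList ed1_rp).get? (pvMotif read rp_length m) = none := by
      intro m hm
      have := hex m hm
      rcases Option.eq_none_or_eq_some ((PySem.Dict.ofList ed1_rp).get? (pvMotif read rp_length m)) with hnone | ⟨v, hv⟩
      · exact hnone
      · exact absurd (by simp [hv]) this
    have hC : pvCands read rp_length (PySem.Dict.ofList ed1_rp).items = [] := by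
      rw [List.eq_nil_iff_forall_not_mem]
      intro c hc
      obtain ⟨j, hj2, hjN, hjget⟩ := pvCand_hit read ed1_rp rp_length hPre _ hc
      exact absurd (hall j hjN) (by simp [hjget])
    rw [hA, hB, hC]
    simp only [List.foldl_nil]
    exact pvLoopA_none read _ rp_length _ _ 0 (by omega) (fun m _ hm => hall m hm)
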